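-- pv_equiv track=rewrite | github.com/elmarMamedov485/ai_p3 | agent.py | _has_neighbor
-- ===== SOURCE A (Python) =====
-- def _has_neighbor(state, row, col, radius):
--     """Check whether a cell is near any existing stone."""
--     for dr in range(-radius, radius + 1):
--         for dc in range(-radius, radius + 1):
--             if dr == 0 and dc == 0:
--                 continue
--             if (row + dr, col + dc) in state:
--                 return True
--     return False
-- ===== SOURCE B (Python) =====
-- def _has_neighbor(state, row, col, radius):
--     """Check whether a cell is near any existing stone."""
--     for (r, c) in state:
--         if (r, c) != (row, col) and abs(r - row) <= radius and abs(c - col) <= radius: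
--             return True
--     return False
-- ===== Notes on version B (the rewrite author's own statement) =====
-- stated objective: faster
-- what changed: B iterates over the occupied cells in state testing Chebyshev distance <= radius (excluding the center cell), instead of scanning the whole (2r+1)x(2r+1) window and testing membership in state for each window cell.
import Mathlib
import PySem

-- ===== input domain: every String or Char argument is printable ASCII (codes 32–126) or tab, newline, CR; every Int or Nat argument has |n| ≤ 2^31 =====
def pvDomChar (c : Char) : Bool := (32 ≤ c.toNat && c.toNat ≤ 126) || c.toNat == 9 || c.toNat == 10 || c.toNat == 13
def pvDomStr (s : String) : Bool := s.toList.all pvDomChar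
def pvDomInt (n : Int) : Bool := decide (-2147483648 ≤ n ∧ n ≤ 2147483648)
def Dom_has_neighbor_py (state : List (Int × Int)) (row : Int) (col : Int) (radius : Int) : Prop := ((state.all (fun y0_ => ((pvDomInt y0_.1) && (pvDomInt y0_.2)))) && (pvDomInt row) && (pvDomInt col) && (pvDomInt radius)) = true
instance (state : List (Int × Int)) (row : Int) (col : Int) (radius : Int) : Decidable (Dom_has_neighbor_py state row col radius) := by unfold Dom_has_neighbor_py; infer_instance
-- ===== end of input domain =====

-- B iterates over the occupied cells testing Chebyshev distance instead of scanning the (2r+1)^2 window; asymptotically faster.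


-- ===== PORT A =====
-- for dr in range(-radius, radius+1): for dc in range(-radius, radius+1): skip (0,0); return True on membership
def has_neighbor_py (state : List (Int × Int)) (row : Int) (col : Int) (radius : Int) : Bool :=
  (PySem.List.pyRange (-radius) (radius + 1) 1).any (fun dr =>
    (PySem.List.pyRange (-radius) (radius + 1) 1).any (fun dc =>
      if dr = 0 ∧ dc = 0 then false
      else decide ((row + dr, col + dc) ∈ state)))

-- ===== PORT B =====
-- for (r, c) in state: return True if (r,c) ≠ (row,col) and both abs-differences are ≤ radius
def has_neighbor_py_alt (state : List (Int × Int)) (row : Int) (col : Int) (radius : Int) : Bool :=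
  state.any (fun p =>
    decide (p ≠ (row, col) ∧ |p.1 - row| ≤ radius ∧ |p.2 - col| ≤ radius))

-- ===== PRECONDITION & SPEC =====
def Spec_has_neighbor_py (state : List (Int × Int)) (row : Int) (col : Int) (radius : Int) (out : Bool) : Prop := out = has_neighbor_py_alt state row col radius
instance (state : List (Int × Int)) (row : Int) (col : Int) (radius : Int) (out : Bool) : Decidable (Spec_has_neighbor_py state row col radius out) := by unfold Spec_has_neighbor_py; infer_instance

-- ===== CLAIM (what is proved, stated in full; the proofs are below) =====
def Claim_equal_has_neighbor_py : Prop := ∀ (state : List (Int × Int)) (row : Int) (col : Int) (radius : Int), Dom_has_neighbor_py state row col radius → Spec_has_neighbor_py state row col radius (has_neighbor_py state row col radius)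

-- ===== LEMMAS AND PROOFS =====

-- ===== VERDICT (by name: the statement is the Claim_ definition above) =====
theorem has_neighbor_py_spec : Claim_equal_has_neighbor_py := by
  intro state row col radius _
  unfold Spec_has_neighbor_py has_neighbor_py has_neighbor_py_alt
  rw [Bool.eq_iff_iff]
  simp only [List.any_eq_true, PySem.List.mem_pyRange_one, decide_eq_true_eq]
  constructor
  · rintro ⟨dr, ⟨h1, h2⟩, dc, ⟨h3, h4⟩, hb⟩
    split at hb
    · exact absurd hb (by simp)
    · rename_i hne
      refine ⟨(row + dr, col + dc), of_decide_eq_true hb, ?_, ?_, ?_⟩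
      · intro h
        have h1 : row + dr = row := congrArg Prod.fst h
        have h2 : col + dc = col := congrArg Prod.snd h
        exact hne ⟨by omega, by omega⟩
      · simp only [abs_le]; constructor <;> omega
      · simp only [abs_le]; constructor <;> omega
  · rintro ⟨⟨r, c⟩, hmem, hne, hr, hc⟩
    simp only [abs_le] at hr hc
    refine ⟨r - row, ⟨by omega, by omega⟩, c - col, ⟨by omega, by omega⟩, ?_⟩
    have : ¬ (r - row = 0 ∧ c - col = 0) := by
      intro ⟨e1, e2⟩
      exact hne (by simp; omega)
    rw [if_neg this]
    simpa using hmem
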